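-- pv_equiv track=rewrite | github.com/xg-gh-25/SwarmAI | backend/utils/diff_parser.py | _find_nearest_heading
-- ===== SOURCE A (Python) =====
-- from typing import List, Optional
--
-- def _find_nearest_heading(file_lines: List[str], line_number: int) -> Optional[str]:
--     """Walk backwards from ``line_number`` (1-based) to find the nearest markdown heading."""
--     for i in range(min(line_number - 1, len(file_lines) - 1), -1, -1):
--         stripped = file_lines[i].strip()
--         if stripped.startswith("#"):
--             # Remove leading '#' symbols and whitespace
--             heading = stripped.lstrip("#").strip()
--             if heading:
--                 return heading
--     return None
-- ===== SOURCE B (Python) =====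
-- from typing import List, Optional
--
-- def _find_nearest_heading(file_lines: List[str], line_number: int) -> Optional[str]:
--     """Forward scan over the lines before ``line_number``, keeping the last heading seen."""
--     result = None
--     for line in file_lines[:max(0, line_number)]:
--         stripped = line.strip()
--         if stripped.startswith("#"):
--             heading = stripped.lstrip("#").strip()
--             if heading:
--                 result = heading
--     return result
-- ===== Notes on version B (the rewrite author's own statement) =====
-- stated objective: simpler
-- what changed: Replaces the backward index walk with early return by a single forward pass over the sliced prefix that keeps the last heading seen in an accumulator.
import Mathlib
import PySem

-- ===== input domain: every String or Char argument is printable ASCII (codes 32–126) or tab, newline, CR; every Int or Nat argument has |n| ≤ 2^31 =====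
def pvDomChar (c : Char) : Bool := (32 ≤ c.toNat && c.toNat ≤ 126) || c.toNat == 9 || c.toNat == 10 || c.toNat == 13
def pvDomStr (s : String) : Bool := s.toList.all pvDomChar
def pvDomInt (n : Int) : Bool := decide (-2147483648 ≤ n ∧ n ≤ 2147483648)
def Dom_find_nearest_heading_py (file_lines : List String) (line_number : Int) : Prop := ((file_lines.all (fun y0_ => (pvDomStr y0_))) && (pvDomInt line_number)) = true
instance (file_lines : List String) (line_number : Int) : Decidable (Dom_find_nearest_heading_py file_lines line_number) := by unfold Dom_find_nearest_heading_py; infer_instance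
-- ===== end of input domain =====

-- B replaces A's backward index walk (early return) with one forward pass over the
-- sliced prefix keeping the last heading seen; objective: simpler.

-- ===== PORT A =====
-- hand port of Python's s.lstrip("#") (exact: drops leading '#' characters)
def pvLstripHashA (s : String) : String := String.ofList (s.toList.dropWhile (· == '#'))

-- the 'for i in range(min(line_number-1, len-1), -1, -1)' loop with early return
def pvLoopA (file_lines : List String) : List Int → Option String
  | [] => none
  | i :: rest =>
    match PySem.List.pyGet? file_lines i with
    | none => none   -- unreachable: range indices are in range
    | some line =>
      let stripped := PySem.Str.strip line
      if PySem.Str.startswith stripped "#" then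
        let heading := PySem.Str.strip (pvLstripHashA stripped)
        if heading ≠ "" then some heading else pvLoopA file_lines rest
      else pvLoopA file_lines rest

def find_nearest_heading_py (file_lines : List String) (line_number : Int) : Option String :=
  pvLoopA file_lines (PySem.List.pyRange (min (line_number - 1) ((file_lines.length : Int) - 1)) (-1) (-1))

-- ===== PORT B =====
-- hand port of Python's s.lstrip("#") (exact: drops leading '#' characters)
def pvLstripHashB (s : String) : String := String.ofList (s.toList.dropWhile (· == '#'))

-- loop body: update the running result from one line
def pvStepB (result : Option String) (line : String) : Option String :=
  let stripped := PySem.Str.strip line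
  if PySem.Str.startswith stripped "#" then
    let heading := PySem.Str.strip (pvLstripHashB stripped)
    if heading ≠ "" then some heading else result
  else result

def find_nearest_heading_py_alt (file_lines : List String) (line_number : Int) : Option String :=
  (PySem.List.slice file_lines none (some (max 0 line_number))).foldl pvStepB none

-- ===== PRECONDITION & SPEC =====
def Spec_find_nearest_heading_py (file_lines : List String) (line_number : Int) (out : Option String) : Prop := out = find_nearest_heading_py_alt file_lines line_number
instance (file_lines : List String) (line_number : Int) (out : Option String) : Decidable (Spec_find_nearest_heading_py file_lines line_number out) := by unfold Spec_find_nearest_heading_py; infer_instance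

-- ===== CLAIM (what is proved, stated in full; the proofs are below) =====
def Claim_equal_find_nearest_heading_py : Prop := ∀ (file_lines : List String) (line_number : Int), Dom_find_nearest_heading_py file_lines line_number → Spec_find_nearest_heading_py file_lines line_number (find_nearest_heading_py file_lines line_number)

-- ===== LEMMAS AND PROOFS =====

-- pyRange counting down to -1 is empty when the start is already below 0
theorem pyRange_down_nil (a : Int) (h : a ≤ -1) : PySem.List.pyRange a (-1) (-1) = [] := by
  simp only [PySem.List.pyRange]
  have : ¬ ((-1 : Int) < a) := by omega
  simp [this]

-- pyRange counting down to -1 peels its first element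
theorem pyRange_down_cons (k : Nat) :
    PySem.List.pyRange (k : Int) (-1) (-1) = (k : Int) :: PySem.List.pyRange ((k : Int) - 1) (-1) (-1) := by
  simp only [PySem.List.pyRange]
  norm_num
  have h1 : (-1:Int) < (k:Int) := by omega
  have h2 : (if 0 < k then k else 0) = k := by split_ifs <;> omega
  rw [if_pos h1, h2, List.range_succ_eq_map]
  simp only [List.map_cons, List.map_map]
  congr 1
  apply List.map_congr_left
  intro a _
  simp only [Function.comp_apply]
  push_cast
  ring

-- core invariant: A's backward scan over indices k-1 … 0 equals B's forward fold over the first k lines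
theorem loop_eq_fold (file_lines : List String) (k : Nat) (hk : k ≤ file_lines.length) :
    pvLoopA file_lines (PySem.List.pyRange ((k : Int) - 1) (-1) (-1))
      = (file_lines.take k).foldl pvStepB none := by
  induction k with
  | zero =>
      rw [pyRange_down_nil _ (by omega)]
      simp [pvLoopA]
  | succ k ih =>
      have hk' : k < file_lines.length := by omega
      have hcast : ((k + 1 : Nat) : Int) - 1 = (k : Int) := by push_cast; ring
      rw [hcast, pyRange_down_cons k]
      have hget : PySem.List.pyGet? file_lines (k : Int) = some (file_lines[k]) := by
        simp [PySem.List.pyGet?_natCast, List.getElem?_eq_getElem hk']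
      have htake : file_lines.take (k + 1) = file_lines.take k ++ [file_lines[k]] := by
        rw [List.take_add_one]
        simp [List.getElem?_eq_getElem hk']
      rw [htake, List.foldl_append]
      simp only [pvLoopA, hget, List.foldl_cons, List.foldl_nil]
      rw [ih (by omega)]
      simp only [pvStepB, pvLstripHashA, pvLstripHashB]

-- any foldl of pvStepB from none over a full take n with n ≥ length equals take (min n length)
theorem take_clamp {α : Type} (xs : List α) (n : Nat) : xs.take n = xs.take (min n xs.length) := by
  rcases Nat.le_total n xs.length with h | h
  · rw [Nat.min_eq_left h]
  · rw [Nat.min_eq_right h, List.take_of_length_le h, List.take_length]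

-- ===== VERDICT (by name: the statement is the Claim_ definition above) =====
theorem find_nearest_heading_py_spec : Claim_equal_find_nearest_heading_py := by
  intro file_lines line_number _
  unfold Spec_find_nearest_heading_py find_nearest_heading_py find_nearest_heading_py_alt
  rw [PySem.List.slice_to file_lines (by omega : (0:Int) ≤ max 0 line_number)]
  by_cases hn : line_number ≤ 0
  · rw [pyRange_down_nil _ (by omega)]
    have : (max 0 line_number).toNat = 0 := by omega
    simp [pvLoopA, this]
  · set k : Nat := min line_number.toNat file_lines.length with hk
    have h1 : min (line_number - 1) ((file_lines.length : Int) - 1) = (k : Int) - 1 := by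
      simp only [hk]; omega
    have h2 : (max 0 line_number).toNat = line_number.toNat := by omega
    rw [h1, loop_eq_fold file_lines k (by omega), h2,
        take_clamp file_lines line_number.toNat]
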